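-- pv_equiv track=rewrite | github.com/Smiti04/dna-storage-system | backend/encoder.py | create_xor_fragment
-- ===== SOURCE A (Python) =====
-- def create_xor_fragment(fragments):
--     """
--     Create an XOR parity fragment from all data fragments.
--     If any single fragment is lost, it can be recovered by
--     XORing the parity fragment with all remaining fragments.
--     """
--     if len(fragments) < 2:
--         return None
--     max_len = max(len(f) // 2 for f in fragments)
--     xor_bytes = bytearray(max_len)
--     for frag in fragments:
--         b = bytes.fromhex(frag)
--         for i in range(len(b)):
--             xor_bytes[i] ^= b[i]
--     return xor_bytes.hex()
-- ===== SOURCE B (Python) =====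
-- from functools import reduce
--
-- def create_xor_fragment(fragments):
--     """XOR parity fragment, computed on one big integer instead of a bytearray."""
--     if len(fragments) < 2:
--         return None
--     max_len = max(len(f) // 2 for f in fragments)
--     x = reduce(lambda acc, f: acc ^ int.from_bytes(bytes.fromhex(f), 'little'),
--                fragments, 0)
--     return x.to_bytes(max_len, 'little').hex()
-- ===== Notes on version B (the rewrite author's own statement) =====
-- stated objective: idiomatic
-- what changed: B represents every fragment as a single big integer (int.from_bytes little-endian), folds one integer XOR over the fragments with functools.reduce, and converts back with to_bytes().hex(), deleting A's bytearray accumulator and its inner byte-by-byte index loop.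
import Mathlib
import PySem

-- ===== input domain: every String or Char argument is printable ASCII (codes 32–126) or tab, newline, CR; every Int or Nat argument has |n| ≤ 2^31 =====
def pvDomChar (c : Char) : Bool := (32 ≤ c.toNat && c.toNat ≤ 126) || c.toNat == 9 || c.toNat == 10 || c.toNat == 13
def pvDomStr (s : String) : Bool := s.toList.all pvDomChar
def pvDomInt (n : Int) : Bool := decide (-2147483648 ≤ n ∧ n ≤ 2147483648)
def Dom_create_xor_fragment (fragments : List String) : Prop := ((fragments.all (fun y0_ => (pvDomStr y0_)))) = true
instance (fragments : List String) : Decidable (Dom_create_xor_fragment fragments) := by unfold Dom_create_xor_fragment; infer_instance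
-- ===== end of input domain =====

-- B replaces A's bytearray accumulator and inner byte loop by one big-integer XOR fold
-- (little-endian int ↔ bytes); objective: idiomatic, same value on every input where A returns
-- (Pre_ excludes only inputs where bytes.fromhex raises ValueError, where both Pythons raise).

-- ===== shared hex helpers (both Pythons call bytes.fromhex / .hex()) =====
-- ASCII whitespace skipped by bytes.fromhex (exact for CPython 3.11 between byte groups)
def pvIsWS (c : Char) : Bool :=
  c.toNat == 32 || c.toNat == 9 || c.toNat == 10 || c.toNat == 11 || c.toNat == 12 || c.toNat == 13

def pvHexVal? (c : Char) : Option Nat :=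
  if 48 ≤ c.toNat ∧ c.toNat ≤ 57 then some (c.toNat - 48)
  else if 97 ≤ c.toNat ∧ c.toNat ≤ 102 then some (c.toNat - 87)
  else if 65 ≤ c.toNat ∧ c.toNat ≤ 70 then some (c.toNat - 55)
  else none

-- bytes.fromhex: none = ValueError (whitespace allowed between byte groups, not inside a pair)
def pvFromHex? : List Char → Option (List Nat)
  | [] => some []
  | c :: rest =>
    if pvIsWS c then pvFromHex? rest
    else match pvHexVal? c with
      | none => none
      | some h =>
        match rest with
        | [] => none
        | d :: r =>
          match pvHexVal? d with
          | none => none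
          | some l => (pvFromHex? r).map (fun bs => (16 * h + l) :: bs)

def pvHexDigit (n : Nat) : Char :=
  if n < 10 then Char.ofNat (48 + n) else Char.ofNat (87 + n)

-- bytes.hex() / bytearray.hex(): lowercase, two digits per byte
def pvBytesHex (bs : List Nat) : String :=
  String.ofList (bs.flatMap (fun b => [pvHexDigit (b / 16), pvHexDigit (b % 16)]))

-- ===== PORT A =====
-- inner loop 'for i in range(len(b)): xor_bytes[i] ^= b[i]'; indices are in range on every
-- input admitted by Pre_ (len b ≤ max_len), so set/getD are exact there
def pvXorInto (st : List Nat) (b : List Nat) : List Nat :=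
  (List.range b.length).foldl (fun s i => s.set i ((s.getD i 0) ^^^ (b.getD i 0))) st

def create_xor_fragment (fragments : List String) : Option String :=
  if fragments.length < 2 then none
  else
    match PySem.List.max? (fragments.map (fun f => PySem.Int.floordiv (f.toList.length : Int) 2)) (fun y => y) with
    | none => none   -- unreachable: fragments has ≥ 2 elements
    | some maxLen =>
      (fragments.foldl
        (fun st? frag => st?.bind fun st => (pvFromHex? frag.toList).map fun b => pvXorInto st b)
        (some (List.replicate maxLen.toNat 0))).map pvBytesHex

-- ===== PORT B =====
-- int.from_bytes(bs, 'little')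
def pvFromBytesLE (bs : List Nat) : Nat := bs.foldr (fun b acc => b + 256 * acc) 0

-- x.to_bytes(n, 'little')
def pvToBytesLE : Nat → Nat → List Nat
  | 0, _ => []
  | n + 1, x => x % 256 :: pvToBytesLE n (x / 256)

def create_xor_fragment_alt (fragments : List String) : Option String :=
  if fragments.length < 2 then none
  else
    match PySem.List.max? (fragments.map (fun f => PySem.Int.floordiv (f.toList.length : Int) 2)) (fun y => y) with
    | none => none   -- unreachable: fragments has ≥ 2 elements
    | some maxLen =>
      (fragments.foldl
        (fun x? frag => x?.bind fun x => (pvFromHex? frag.toList).map fun b => x ^^^ pvFromBytesLE b)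
        (some 0)).map (fun x => pvBytesHex (pvToBytesLE maxLen.toNat x))

-- ===== PRECONDITION & SPEC =====
-- grammar of strings bytes.fromhex accepts: whitespace-separated pairs of hex digits
def pvValidHex : List Char → Bool
  | [] => true
  | c :: rest =>
    if pvIsWS c then pvValidHex rest
    else match rest with
      | [] => false
      | d :: r => (pvHexVal? c).isSome && (pvHexVal? d).isSome && pvValidHex r

-- excluded: lists of ≥ 2 strings containing one bytes.fromhex rejects — there A raises ValueError
def Pre_create_xor_fragment (fragments : List String) : Prop :=
  fragments.length < 2 ∨ ∀ f ∈ fragments, pvValidHex f.toList = true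
instance (fragments : List String) : Decidable (Pre_create_xor_fragment fragments) := by
  unfold Pre_create_xor_fragment; infer_instance

def pvWitness_create_xor_fragment : List String := ["aabb", "0f 10", "ABcd"]

def Spec_create_xor_fragment (fragments : List String) (out : Option String) : Prop :=
  out = create_xor_fragment_alt fragments
instance (fragments : List String) (out : Option String) :
    Decidable (Spec_create_xor_fragment fragments out) := by
  unfold Spec_create_xor_fragment; infer_instance

-- ===== CLAIM (what is proved, stated in full; the proofs are below) =====
def Claim_equal_create_xor_fragment : Prop :=
  ∀ (fragments : List String), Dom_create_xor_fragment fragments →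
    Pre_create_xor_fragment fragments →
      Spec_create_xor_fragment fragments (create_xor_fragment fragments)

-- ===== LEMMAS AND PROOFS =====

-- (x ^^^ y) % 256 = x % 256 ^^^ y % 256
theorem pv_xor_mod256 (x y : Nat) : (x ^^^ y) % 256 = (x % 256) ^^^ (y % 256) := by
  show (x ^^^ y) % 2 ^ 8 = (x % 2 ^ 8) ^^^ (y % 2 ^ 8)
  apply Nat.eq_of_testBit_eq
  intro i
  simp only [Nat.testBit_mod_two_pow, Nat.testBit_xor, Bool.and_xor_distrib_left]

-- (x ^^^ y) / 256 = x / 256 ^^^ y / 256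
theorem pv_xor_div256 (x y : Nat) : (x ^^^ y) / 256 = (x / 256) ^^^ (y / 256) := by
  show (x ^^^ y) / 2 ^ 8 = (x / 2 ^ 8) ^^^ (y / 2 ^ 8)
  rw [← Nat.shiftRight_eq_div_pow, ← Nat.shiftRight_eq_div_pow, ← Nat.shiftRight_eq_div_pow]
  apply Nat.eq_of_testBit_eq
  intro i
  simp only [Nat.testBit_shiftRight, Nat.testBit_xor]

theorem pv_length_toBytesLE (n x : Nat) : (pvToBytesLE n x).length = n := by
  induction n generalizing x with
  | zero => rfl
  | succ n ih => simp [pvToBytesLE, ih]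

theorem pv_toBytesLE_zero (n : Nat) : pvToBytesLE n 0 = List.replicate n 0 := by
  induction n with
  | zero => rfl
  | succ n ih => simp [pvToBytesLE, ih, List.replicate_succ]

theorem pv_toBytesLE_xor (n x y : Nat) :
    pvToBytesLE n (x ^^^ y) = List.zipWith (· ^^^ ·) (pvToBytesLE n x) (pvToBytesLE n y) := by
  induction n generalizing x y with
  | zero => rfl
  | succ n ih => simp [pvToBytesLE, pv_xor_mod256, pv_xor_div256, ih]

theorem pv_toBytesLE_fromBytesLE (n : Nat) (bs : List Nat)
    (hb : ∀ b ∈ bs, b < 256) (hl : bs.length ≤ n) :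
    pvToBytesLE n (pvFromBytesLE bs) = bs ++ List.replicate (n - bs.length) 0 := by
  induction bs generalizing n with
  | nil => simpa [pvFromBytesLE] using pv_toBytesLE_zero n
  | cons b rest ih =>
    cases n with
    | zero => simp at hl
    | succ n =>
      have hb0 : b < 256 := hb b (by simp)
      have h1 : pvFromBytesLE (b :: rest) % 256 = b := by
        simp only [pvFromBytesLE, List.foldr]; omega
      have h2 : pvFromBytesLE (b :: rest) / 256 = pvFromBytesLE rest := by
        simp only [pvFromBytesLE, List.foldr]; omega
      have hr := ih n (fun z hz => hb z (by simp [hz])) (by simpa using hl)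
      rw [show pvToBytesLE (n + 1) (pvFromBytesLE (b :: rest))
            = pvFromBytesLE (b :: rest) % 256 :: pvToBytesLE n (pvFromBytesLE (b :: rest) / 256) from rfl,
        h1, h2, hr]
      simp

-- the inner index loop, elementwise
theorem pv_xorInto_aux (st b : List Nat) (hlb : b.length ≤ st.length) :
    ∀ k, k ≤ b.length →
      ((List.range k).foldl (fun s i => s.set i ((s.getD i 0) ^^^ (b.getD i 0))) st).length = st.length ∧
      ∀ i, ((List.range k).foldl (fun s i => s.set i ((s.getD i 0) ^^^ (b.getD i 0))) st).getD i 0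
        = if i < k then st.getD i 0 ^^^ b.getD i 0 else st.getD i 0 := by
  intro k
  induction k with
  | zero => intro _; simp
  | succ k ih =>
    intro hk
    obtain ⟨ihl, ihg⟩ := ih (by omega)
    rw [List.range_succ, List.foldl_append, List.foldl_cons, List.foldl_nil]
    set P := (List.range k).foldl (fun s i => s.set i ((s.getD i 0) ^^^ (b.getD i 0))) st with hP
    constructor
    · simp [ihl]
    · intro i
      have hkP : k < P.length := by omega
      by_cases hik : i = k
      · subst hik
        have : (P.set i (P.getD i 0 ^^^ b.getD i 0)).getD i 0 = P.getD i 0 ^^^ b.getD i 0 := by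
          simp [List.getD, hkP]
        rw [this, ihg i]
        simp
      · have : (P.set k (P.getD k 0 ^^^ b.getD k 0)).getD i 0 = P.getD i 0 := by
          simp only [List.getD, List.getElem?_set]
          rw [if_neg (show k ≠ i from fun h => hik h.symm)]
        rw [this, ihg i]
        by_cases h1 : i < k <;> by_cases h2 : i < k + 1 <;> simp [h1, h2] <;> omega

theorem pv_xorInto_eq (st b : List Nat) (hlb : b.length ≤ st.length) :
    pvXorInto st b = List.zipWith (· ^^^ ·) st (b ++ List.replicate (st.length - b.length) 0) := by
  obtain ⟨hl, hg⟩ := pv_xorInto_aux st b hlb b.length le_rfl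
  apply List.ext_getElem
  · unfold pvXorInto
    rw [List.length_zipWith, hl, List.length_append, List.length_replicate]
    omega
  · intro i h1 h2
    rw [← List.getD_eq_getElem _ 0 h1]
    unfold pvXorInto
    rw [hg i]
    rw [List.getElem_zipWith]
    by_cases hib : i < b.length
    · rw [List.getElem_append_left (by omega), ← List.getD_eq_getElem st 0, ← List.getD_eq_getElem b 0]
      simp [hib]
    · rw [List.getElem_append_right (by omega)]
      simp [hib, ← List.getD_eq_getElem st 0]

-- one step: A's bytearray state tracks B's integer state
theorem pv_step (n x : Nat) (b : List Nat) (hb : ∀ z ∈ b, z < 256) (hl : b.length ≤ n) :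
    pvXorInto (pvToBytesLE n x) b = pvToBytesLE n (x ^^^ pvFromBytesLE b) := by
  rw [pv_toBytesLE_xor, pv_toBytesLE_fromBytesLE n b hb hl,
    pv_xorInto_eq _ _ (by simp [pv_length_toBytesLE]; omega), pv_length_toBytesLE]

-- soundness facts about pvFromHex?
theorem pv_hexVal_lt (c : Char) (v : Nat) (h : pvHexVal? c = some v) : v < 16 := by
  unfold pvHexVal? at h
  split_ifs at h <;> simp_all <;> omega

theorem pv_fromHex_sound : ∀ l bs, pvFromHex? l = some bs →
    (∀ b ∈ bs, b < 256) ∧ 2 * bs.length ≤ l.length := by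
  intro l
  induction l using pvFromHex?.induct <;> intro bs hh <;> rw [pvFromHex?] at hh <;> simp_all
  case case2 c rest hws ih =>
    have := ih.2; omega
  case case6 c h d r l hws hvc hvd ih =>
    obtain ⟨bs', hr, rfl⟩ := hh
    obtain ⟨h1, h2⟩ := ih bs' hr
    have hv1 := pv_hexVal_lt _ _ hvc
    have hv2 := pv_hexVal_lt _ _ hvd
    refine ⟨?_, by simp; omega⟩
    intro b hb
    simp at hb
    rcases hb with rfl | hb
    · omega
    · exact h1 b hb

theorem pv_foldA_none (frs : List String) :
    frs.foldl (fun st? frag => st?.bind fun st => (pvFromHex? frag.toList).map fun b => pvXorInto st b) none = none := by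
  induction frs with
  | nil => rfl
  | cons f frs ih => simpa using ih

theorem pv_foldB_none (frs : List String) :
    frs.foldl (fun x? frag => x?.bind fun x => (pvFromHex? frag.toList).map fun b => x ^^^ pvFromBytesLE b) none = none := by
  induction frs with
  | nil => rfl
  | cons f frs ih => simpa using ih

theorem pv_fold_rel (frs : List String) (n : Nat)
    (hn : ∀ f ∈ frs, f.toList.length / 2 ≤ n) :
    ∀ x, frs.foldl (fun st? frag => st?.bind fun st => (pvFromHex? frag.toList).map fun b => pvXorInto st b)
        (some (pvToBytesLE n x))
      = (frs.foldl (fun x? frag => x?.bind fun x => (pvFromHex? frag.toList).map fun b => x ^^^ pvFromBytesLE b)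
          (some x)).map (pvToBytesLE n) := by
  induction frs with
  | nil => intro x; rfl
  | cons f frs ih =>
    intro x
    cases hfh : pvFromHex? f.toList with
    | none =>
      simp only [List.foldl_cons, hfh, Option.bind_some, Option.map_none]
      rw [pv_foldA_none, pv_foldB_none]
      rfl
    | some b =>
      have hs := pv_fromHex_sound _ _ hfh
      have hlb : b.length ≤ n := le_trans (by omega) (hn f (by simp))
      simp only [List.foldl_cons, hfh, Option.bind_some, Option.map_some]
      rw [pv_step n x b hs.1 hlb]
      exact ih (fun g hg => hn g (by simp [hg])) _

theorem pv_max_bound (fragments : List String) (maxLen : Int)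
    (h : PySem.List.max? (fragments.map (fun f => PySem.Int.floordiv (f.toList.length : Int) 2)) (fun y => y) = some maxLen) :
    ∀ f ∈ fragments, f.toList.length / 2 ≤ maxLen.toNat := by
  intro f hf
  have hmem := List.mem_map_of_mem (f := fun f => PySem.Int.floordiv ((f : String).toList.length : Int) 2) hf
  have hle : PySem.Int.floordiv ((f.toList.length : Nat) : Int) 2 ≤ maxLen :=
    PySem.List.max?_isMax h _ hmem
  have hcast : PySem.Int.floordiv ((f.toList.length : Nat) : Int) 2 = ((f.toList.length / 2 : Nat) : Int) := by
    exact_mod_cast PySem.Int.floordiv_natCast f.toList.length 2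
  rw [hcast] at hle
  omega

-- ===== VERDICT (by name: the statement is the Claim_ definition above) =====
theorem create_xor_fragment_spec : Claim_equal_create_xor_fragment := by
  intro fragments _ _
  unfold Spec_create_xor_fragment create_xor_fragment create_xor_fragment_alt
  by_cases h2 : fragments.length < 2
  · simp [h2]
  · simp only [h2, if_false]
    cases hm : PySem.List.max? (fragments.map (fun f => PySem.Int.floordiv (f.toList.length : Int) 2)) (fun y => y) with
    | none => rfl
    | some maxLen =>
      have hb := pv_max_bound fragments maxLen hm
      have := pv_fold_rel fragments maxLen.toNat hb 0
      rw [pv_toBytesLE_zero] at this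
      dsimp only
      rw [this, Option.map_map]
      rfl
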